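-- pv_equiv track=rewrite | github.com/gedaskir/qmeq | qmeq/indexing.py | enum_chargelst
-- ===== SOURCE A (Python) =====
-- def enum_chargelst(chargelst_lin):
--     """
--     Make a list of integers from 0 to 2^nsingle having nesting of chargelst_lin.
--
--     Parameters
--     ----------
--     chargelst_lin : list of lists
--         Constructed by construct_chargelst(nsingle).
--
--     Returns
--     -------
--     chargelst : list of lists
--     """
--     ncharge = len(chargelst_lin)
--     chargelst = [[] for _ in range(ncharge)]
--     counter1 = 0
--     for j1 in range(ncharge):
--         counter2 = counter1 + len(chargelst_lin[j1])
--         chargelst[j1] = list(range(counter1, counter2))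
--         counter1 = counter2
--     return chargelst
-- ===== SOURCE B (Python) =====
-- def enum_chargelst(chargelst_lin):
--     # Bucket/grouping algorithm: flatten the nesting into one label per global
--     # slot, then scan the flat label sequence once, dropping each global index
--     # into its label's bucket.
--     labels = [j for j, sub in enumerate(chargelst_lin) for _ in sub]
--     out = [[] for _ in chargelst_lin]
--     for i, j in enumerate(labels):
--         out[j].append(i)
--     return out
-- ===== Notes on version B (the rewrite author's own statement) =====
-- stated objective: alternative
-- what changed: Replaces the per-sublist running counter emitting ranges with a flatten-then-group bucket algorithm: a flat label sequence (one label per global slot) is built first, then a single scan distributes each global index into its label's bucket.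
import Mathlib
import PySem

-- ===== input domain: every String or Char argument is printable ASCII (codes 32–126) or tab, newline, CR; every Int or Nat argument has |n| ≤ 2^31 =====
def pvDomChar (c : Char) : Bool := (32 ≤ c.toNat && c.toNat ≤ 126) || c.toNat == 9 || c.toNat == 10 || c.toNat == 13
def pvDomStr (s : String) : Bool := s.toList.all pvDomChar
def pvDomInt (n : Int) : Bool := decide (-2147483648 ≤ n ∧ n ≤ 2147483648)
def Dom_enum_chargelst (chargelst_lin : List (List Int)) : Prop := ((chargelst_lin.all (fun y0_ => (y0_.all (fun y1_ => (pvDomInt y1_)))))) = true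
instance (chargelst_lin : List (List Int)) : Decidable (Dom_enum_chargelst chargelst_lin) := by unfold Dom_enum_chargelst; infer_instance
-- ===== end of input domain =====

-- B replaces A's per-sublist running counter with a flatten-then-group bucket algorithm
-- (flat label list, then one scan dropping each global index into its bucket); same cost.

-- ===== PORT A =====
-- single pass: counter1 runs over the list, chargelst[j1] is overwritten in place
def enum_chargelst (chargelst_lin : List (List Int)) : List (List Int) :=
  let ncharge : Int := chargelst_lin.length
  let chargelst : List (List Int) := (PySem.List.pyRange 0 ncharge 1).map (fun _ => ([] : List Int))
  let st := (PySem.List.pyRange 0 ncharge 1).foldl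
    (fun (st : List (List Int) × Int) j1 =>
      let counter2 : Int := st.2 + ((PySem.List.pyGetD chargelst_lin j1 []).length : Int)
      (st.1.set j1.toNat (PySem.List.pyRange st.2 counter2 1), counter2))
    (chargelst, 0)
  st.1

-- ===== PORT B =====
-- phase 1: flat label list (one label per global slot); phase 2: bucket scan.
-- 'out[j].append(i)' ported as set/getD at j.toNat: every label j is a valid
-- nonnegative index into out, so this is exact.
def enum_chargelst_alt (chargelst_lin : List (List Int)) : List (List Int) :=
  let labels : List Int :=
    (PySem.List.enumerate chargelst_lin 0).flatMap (fun p => p.2.map (fun _ => p.1))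
  let out : List (List Int) := chargelst_lin.map (fun _ => ([] : List Int))
  (PySem.List.enumerate labels 0).foldl
    (fun (out : List (List Int)) p =>
      out.set p.2.toNat (out.getD p.2.toNat [] ++ [p.1])) out

-- ===== PRECONDITION & SPEC =====
def Spec_enum_chargelst (chargelst_lin : List (List Int)) (out : List (List Int)) : Prop := out = enum_chargelst_alt chargelst_lin
instance (chargelst_lin : List (List Int)) (out : List (List Int)) : Decidable (Spec_enum_chargelst chargelst_lin out) := by unfold Spec_enum_chargelst; infer_instance

-- ===== CLAIM (what is proved, stated in full; the proofs are below) =====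
def Claim_equal_enum_chargelst : Prop := ∀ (chargelst_lin : List (List Int)), Dom_enum_chargelst chargelst_lin → Spec_enum_chargelst chargelst_lin (enum_chargelst chargelst_lin)

-- ===== LEMMAS AND PROOFS =====

-- common reference form: one range per sublist, starting at c
def pvGo (c : Int) : List (List Int) → List (List Int)
  | [] => []
  | x :: t => PySem.List.pyRange c (c + x.length) 1 :: pvGo (c + x.length) t

-- B's flat label list for the tail starting at label k
def pvLab (k : Int) : List (List Int) → List Int
  | [] => []
  | x :: t => List.replicate x.length k ++ pvLab (k + 1) t

-- B's bucket-insertion step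
def pvStep (out : List (List Int)) (p : Int × Int) : List (List Int) :=
  out.set p.2.toNat (out.getD p.2.toNat [] ++ [p.1])

theorem pvLab_eq (xs : List (List Int)) (k : Int) :
    (PySem.List.enumerate xs k).flatMap (fun p => p.2.map (fun _ => p.1)) = pvLab k xs := by
  induction xs generalizing k with
  | nil => simp [pvLab, PySem.List.enumerate_nil]
  | cons x t ih =>
    rw [PySem.List.enumerate_cons, List.flatMap_cons, ih (k + 1)]
    simp [pvLab, List.map_const']

theorem pvFold_block (n : Nat) (j : Int) :
    ∀ (c : Int) (s : List (List Int)), j.toNat < s.length →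
    (PySem.List.enumerate (List.replicate n j) c).foldl pvStep s
      = s.set j.toNat (s.getD j.toNat [] ++ PySem.List.pyRange c (c + n) 1) := by
  induction n with
  | zero =>
    intro c s hs
    rw [PySem.List.pyRange_one_eq_nil (by omega)]
    simp [PySem.List.enumerate_nil, List.getD_eq_getElem?_getD,
      List.getElem?_eq_getElem hs, List.set_getElem_self]
  | succ n ih =>
    intro c s hs
    rw [List.replicate_succ, PySem.List.enumerate_cons, List.foldl_cons]
    have hstep : pvStep s (c, j) = s.set j.toNat (s.getD j.toNat [] ++ [c]) := rfl
    rw [hstep, ih (c + 1) _ (by simpa using hs)]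
    have hget2 : (s.set j.toNat (s.getD j.toNat [] ++ [c])).getD j.toNat []
        = s.getD j.toNat [] ++ [c] := by
      simp [List.getD_eq_getElem?_getD, hs]
    rw [hget2, List.set_set, List.append_assoc]
    congr 2
    push_cast
    rw [PySem.List.pyRange_one_cons (show c < c + ((n : Int) + 1) by omega)]
    simp [show c + ((n : Int) + 1) = c + 1 + (n : Int) by ring]

theorem pvB_loop (t : List (List Int)) :
    ∀ (done : List (List Int)) (c : Int),
    (PySem.List.enumerate (pvLab (done.length : Int) t) c).foldl pvStep
        (done ++ t.map (fun _ => ([] : List Int)))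
      = done ++ pvGo c t := by
  induction t with
  | nil => intro done c; simp [pvLab, pvGo, PySem.List.enumerate_nil]
  | cons x t ih =>
    intro done c
    rw [show pvLab (done.length : Int) (x :: t)
        = List.replicate x.length (done.length : Int) ++ pvLab ((done.length : Int) + 1) t from rfl,
      PySem.List.enumerate_append, List.foldl_append]
    have hlt : ((done.length : Int)).toNat < (done ++ (x :: t).map (fun _ => ([] : List Int))).length := by
      simp
    rw [pvFold_block x.length (done.length : Int) c _ hlt]
    have hgetD : (done ++ (x :: t).map (fun _ => ([] : List Int))).getD ((done.length : Int)).toNat [] = [] := by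
      simp [List.getD_eq_getElem?_getD]
    have hset : (done ++ (x :: t).map (fun _ => ([] : List Int))).set ((done.length : Int)).toNat
        (PySem.List.pyRange c (c + (x.length : Int)) 1)
        = (done ++ [PySem.List.pyRange c (c + (x.length : Int)) 1]) ++ t.map (fun _ => ([] : List Int)) := by
      simp
    rw [hgetD, List.nil_append, hset]
    have := ih (done ++ [PySem.List.pyRange c (c + (x.length : Int)) 1]) (c + x.length)
    simp only [List.length_append, List.length_cons, List.length_nil, List.length_replicate] at this ⊢
    push_cast at this ⊢
    simpa [pvGo] using this

theorem pvB_eq (xs : List (List Int)) : enum_chargelst_alt xs = pvGo 0 xs := by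
  unfold enum_chargelst_alt
  simp only [pvLab_eq]
  have := pvB_loop xs [] 0
  simp only [List.length_nil, Int.natCast_zero, List.nil_append] at this
  exact this

theorem pvA_loop (xs : List (List Int)) :
    ∀ (t pre : List (List Int)) (c : Int), t = xs.drop pre.length →
    ((PySem.List.pyRange (pre.length : Int) (xs.length : Int) 1).foldl
      (fun (st : List (List Int) × Int) j1 =>
        let counter2 : Int := st.2 + ((PySem.List.pyGetD xs j1 []).length : Int)
        (st.1.set j1.toNat (PySem.List.pyRange st.2 counter2 1), counter2))
      (pre ++ t.map (fun _ => ([] : List Int)), c)).1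
      = pre ++ pvGo c t := by
  intro t
  induction t with
  | nil =>
    intro pre c ht
    have hlen : xs.length ≤ pre.length := by
      have := congrArg List.length ht; simp at this; omega
    rw [PySem.List.pyRange_one_eq_nil (by exact_mod_cast hlen)]
    simp [pvGo]
  | cons x t ih =>
    intro pre c ht
    have hlt : pre.length < xs.length := by
      by_contra h
      rw [List.drop_eq_nil_of_le (by omega)] at ht
      simp at ht
    rw [PySem.List.pyRange_one_cons (by exact_mod_cast hlt)]
    simp only [List.foldl_cons]
    have hget : PySem.List.pyGetD xs (pre.length : Int) [] = x := by
      have h : xs[pre.length]? = some x := by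
        have h0 := congrArg (fun l => l[0]?) ht
        simpa [List.getElem?_drop] using h0.symm
      simp [PySem.List.pyGetD_natCast, List.getD, h]
    have hset : (pre ++ (x :: t).map (fun _ => ([] : List Int))).set ((pre.length : Int)).toNat
        (PySem.List.pyRange c (c + (x.length : Int)) 1)
        = (pre ++ [PySem.List.pyRange c (c + (x.length : Int)) 1]) ++ t.map (fun _ => ([] : List Int)) := by
      simp
    have hdrop : t = xs.drop (pre ++ [PySem.List.pyRange c (c + (x.length : Int)) 1]).length := by
      have : xs.drop (pre.length + 1) = (xs.drop pre.length).drop 1 := by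
        simp [List.drop_drop]
      simp [this, ← ht]
    have := ih (pre ++ [PySem.List.pyRange c (c + (x.length : Int)) 1]) (c + x.length) hdrop
    simp only [hget, hset]
    simp only [List.length_append, List.length_cons, List.length_nil] at this ⊢
    push_cast at this ⊢
    rw [show ((pre.length : Int) + 1) = (pre.length : Int) + 1 by ring] at this
    simpa [pvGo] using this

theorem pvA_eq (xs : List (List Int)) : enum_chargelst xs = pvGo 0 xs := by
  unfold enum_chargelst
  have h0 : (PySem.List.pyRange 0 (xs.length : Int) 1).map (fun _ => ([] : List Int))
      = xs.map (fun _ => ([] : List Int)) := by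
    apply List.ext_getElem <;> simp [PySem.List.length_pyRange_one]
  have := pvA_loop xs xs [] 0 (by simp)
  simpa [h0] using this

-- ===== VERDICT (by name: the statement is the Claim_ definition above) =====
theorem enum_chargelst_spec : Claim_equal_enum_chargelst := by
  intro xs _
  unfold Spec_enum_chargelst
  rw [pvA_eq, pvB_eq]
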